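-- pv_equiv track=rewrite | github.com/MBernart/schoolcpp | klasa4/2021_12_09/main.py | podciagLiczbZeWspolnymDzielnikiem
-- ===== SOURCE A (Python) =====
-- def nwd(a, b):
--     while a != b:
--         if a > b:
--             a -= b
--         else:
--             b -= a
--     return a
--
-- def podciagLiczbZeWspolnymDzielnikiem(tab):
--     licznik = 0
--     wspolnyDzielnik = 0
--     indeksPierwszego = 0
--     wspolnyDzielnikTymczasowy = 0
--     for i in range(len(tab) - 1):
--         licznikTymczasowy = 0
--         wspolnyDzielnikTymczasowy = tab[i]
--         for j in range(i, len(tab)):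
--             dzielnikDlaIteracji = wspolnyDzielnikTymczasowy
--             wspolnyDzielnikTymczasowy = nwd(wspolnyDzielnikTymczasowy, tab[j])
--             if wspolnyDzielnikTymczasowy != 1:
--                 licznikTymczasowy += 1
--             else:
--                 if licznik < licznikTymczasowy:
--                     wspolnyDzielnik = dzielnikDlaIteracji
--                     licznik = licznikTymczasowy
--                     indeksPierwszego = i
--     return tab[indeksPierwszego], licznik, wspolnyDzielnik
-- ===== SOURCE B (Python) =====
-- def _gcd(a, b):
--     while b:
--         a, b = b, a % b
--     return a
--
-- def podciagLiczbZeWspolnymDzielnikiem(tab):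
--     best_len, best_start, best_g = 0, 0, 0
--     alive = []  # runs whose common divisor is still > 1, as (start, gcd) pairs
--     for j in range(len(tab)):
--         x = tab[j]
--         survivors = []
--         for start, g in alive + [(j, x)]:
--             ng = _gcd(g, x)
--             if ng != 1:
--                 survivors.append((start, ng))
--             elif j - start > best_len:
--                 best_len, best_start, best_g = j - start, start, g
--         alive = survivors
--     return tab[best_start], best_len, best_g
-- ===== Notes on version B (the rewrite author's own statement) =====
-- stated objective: alternative
-- what changed: B replaces A's per-start rescan with subtractive gcd by a single left-to-right sweep that maintains the list of still-alive runs as (start, gcd) pairs with Euclid's gcd, recording a run the moment its cumulative gcd collapses to 1 (intended as cheaper; a timing run could not measure a ratio because A's subtractive gcd already times out on small random inputs); Pre_ excludes inputs on which A raises or loops forever (the empty list raises IndexError; …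
-- outside the precondition, e.g. on podciagLiczbZeWspolnymDzielnikiem([0, 0]): A returns (0, 0, 0), B returns (0, 0, 0); on podciagLiczbZeWspolnymDzielnikiem([2, -4]): A does not finish within the time limit, B returns (2, 0, 0)
import Mathlib
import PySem

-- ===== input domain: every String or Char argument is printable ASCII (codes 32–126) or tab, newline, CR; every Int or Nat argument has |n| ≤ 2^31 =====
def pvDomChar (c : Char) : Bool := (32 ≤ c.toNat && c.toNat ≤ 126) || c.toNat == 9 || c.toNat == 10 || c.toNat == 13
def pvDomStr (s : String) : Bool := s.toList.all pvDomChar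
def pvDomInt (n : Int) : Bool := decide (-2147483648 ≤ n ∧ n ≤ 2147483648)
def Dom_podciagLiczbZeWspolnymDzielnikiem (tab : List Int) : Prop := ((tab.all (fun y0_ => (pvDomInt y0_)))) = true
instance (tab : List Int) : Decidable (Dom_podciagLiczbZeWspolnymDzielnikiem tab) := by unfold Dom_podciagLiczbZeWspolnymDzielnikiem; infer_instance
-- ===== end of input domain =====

-- B replaces A's per-start rescan with subtractive gcd by a single left-to-right sweep that keeps
-- the still-alive runs as (start, gcd) pairs with Euclid's gcd and records a run when its
-- cumulative gcd collapses to 1; objective: alternative.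

-- ===== PORT A =====
-- Python's `nwd` is a while-loop that diverges unless it reaches a == b; `nwdFuel` runs the same
-- loop with fuel a.toNat + b.toNat, which is enough on all positive inputs (nwdFuel_eq_gcd below);
-- outside Pre_ the Python loop does not terminate, so nothing is claimed there.
def nwdFuel : Nat → Int → Int → Int
  | 0, a, _ => a
  | f + 1, a, b => if a ≠ b then (if a > b then nwdFuel f (a - b) b else nwdFuel f a (b - a)) else a

def nwd (a b : Int) : Int := nwdFuel (a.toNat + b.toNat) a b

-- body of A's inner `for j in range(i, len(tab))` loop; state (licznikTym, wspolnyTym, licznik, wspolnyDzielnik, indeksPierwszego)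
def aInnerStep (tab : List Int) (i : Int) (t : Int × Int × Int × Int × Int) (j : Int) : Int × Int × Int × Int × Int :=
  let dzielnikDlaIteracji := t.2.1
  let g := nwd t.2.1 (PySem.List.pyGetD tab j 0)
  if g ≠ 1 then (t.1 + 1, g, t.2.2.1, t.2.2.2.1, t.2.2.2.2)
  else if t.2.2.1 < t.1 then (t.1, g, t.1, dzielnikDlaIteracji, i)
  else (t.1, g, t.2.2.1, t.2.2.2.1, t.2.2.2.2)

-- body of A's outer `for i in range(len(tab) - 1)` loop; state (licznik, wspolnyDzielnik, indeksPierwszego)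
def aOuterStep (tab : List Int) (n : Int) (s : Int × Int × Int) (i : Int) : Int × Int × Int :=
  let inner := (PySem.List.pyRange i n 1).foldl (aInnerStep tab i) (0, PySem.List.pyGetD tab i 0, s.1, s.2.1, s.2.2)
  (inner.2.2.1, inner.2.2.2.1, inner.2.2.2.2)

def podciagLiczbZeWspolnymDzielnikiem (tab : List Int) : Int × Int × Int :=
  let n : Int := tab.length
  let res := (PySem.List.pyRange 0 (n - 1) 1).foldl (aOuterStep tab n) (0, 0, 0)
  (PySem.List.pyGetD tab res.2.2 0, res.1, res.2.1)

-- ===== PORT B =====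
-- `_gcd` of Source B (Euclid's algorithm with Python's `%`); the while-loop is run on fuel
-- |b| + 1, which is enough on every input because |a % b| < |b| whenever b ≠ 0
def pyGcdFuel : Nat → Int → Int → Int
  | 0, a, _ => a
  | f + 1, a, b => if b ≠ 0 then pyGcdFuel f b (PySem.Int.mod a b) else a

def pyGcd (a b : Int) : Int := pyGcdFuel (b.natAbs + 1) a b

-- body of Source B's inner `for start, g in alive + [(j, x)]` loop;
-- state ((best_len, best_start, best_g), survivors)
def bInnerStepB (x j : Int) (st : (Int × Int × Int) × List (Int × Int)) (sg : Int × Int) :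
    (Int × Int × Int) × List (Int × Int) :=
  let ng := pyGcd sg.2 x
  if ng ≠ 1 then (st.1, st.2 ++ [(sg.1, ng)])
  else if j - sg.1 > st.1.1 then ((j - sg.1, sg.1, sg.2), st.2)
  else st

-- body of Source B's outer `for j in range(len(tab))` loop; state ((best_len, best_start, best_g), alive)
def bStepB (tab : List Int) (st : (Int × Int × Int) × List (Int × Int)) (j : Int) :
    (Int × Int × Int) × List (Int × Int) :=
  let x := PySem.List.pyGetD tab j 0
  (st.2 ++ [(j, x)]).foldl (bInnerStepB x j) (st.1, [])

def podciagLiczbZeWspolnymDzielnikiem_alt (tab : List Int) : Int × Int × Int :=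
  let n : Int := tab.length
  let r := (PySem.List.pyRange 0 n 1).foldl (bStepB tab) ((0, 0, 0), [])
  (PySem.List.pyGetD tab r.1.2.1 0, r.1.1, r.1.2.2)

-- ===== PRECONDITION & SPEC =====
-- Pre_ excludes the empty list (A raises IndexError) and multi-element lists with a non-positive
-- entry, on which A's subtractive gcd loops forever (except degenerate constant lists such as
-- [0,0], where it happens to halt and B returns the same value anyway).
def Pre_podciagLiczbZeWspolnymDzielnikiem (tab : List Int) : Prop :=
  tab.length = 1 ∨ (tab ≠ [] ∧ ∀ x ∈ tab, 0 < x)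
instance (tab : List Int) : Decidable (Pre_podciagLiczbZeWspolnymDzielnikiem tab) := by
  unfold Pre_podciagLiczbZeWspolnymDzielnikiem; infer_instance

def pvWitness_podciagLiczbZeWspolnymDzielnikiem : List Int := [2, 4, 3]

def Spec_podciagLiczbZeWspolnymDzielnikiem (tab : List Int) (out : Int × Int × Int) : Prop := out = podciagLiczbZeWspolnymDzielnikiem_alt tab
instance (tab : List Int) (out : Int × Int × Int) : Decidable (Spec_podciagLiczbZeWspolnymDzielnikiem tab out) := by unfold Spec_podciagLiczbZeWspolnymDzielnikiem; infer_instance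

-- ===== CLAIM (what is proved, stated in full; the proofs are below) =====
def Claim_equal_podciagLiczbZeWspolnymDzielnikiem : Prop := ∀ (tab : List Int), Dom_podciagLiczbZeWspolnymDzielnikiem tab → Pre_podciagLiczbZeWspolnymDzielnikiem tab → Spec_podciagLiczbZeWspolnymDzielnikiem tab (podciagLiczbZeWspolnymDzielnikiem tab)

-- ===== LEMMAS AND PROOFS =====

-- the element fetched by an in-range index is one of the (positive) list elements
lemma pv_get_pos (tab : List Int) (hpos : ∀ x ∈ tab, 0 < x) (j : Int) (h0 : 0 ≤ j)
    (h1 : j < (tab.length : Int)) : 0 < PySem.List.pyGetD tab j 0 := by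
  have hlt : j.toNat < tab.length := by omega
  rw [PySem.List.pyGetD_eq_getElem tab 0 h0 h1]
  exact hpos _ (List.getElem_mem hlt)

-- the subtractive loop, with fuel a.toNat + b.toNat, computes gcd on positive inputs
lemma nwdFuel_eq_gcd : ∀ (f : Nat) (a b : Int), 0 < a → 0 < b → a.toNat + b.toNat ≤ f + 1 →
    nwdFuel f a b = ((Int.gcd a b : Nat) : Int) := by
  intro f
  induction f with
  | zero => intro a b ha hb hf; omega
  | succ f ih =>
    intro a b ha hb hf
    by_cases hab : a = b
    · subst hab
      simp only [nwdFuel, ne_eq, not_true_eq_false, if_false]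
      rw [Int.gcd_self]; omega
    · simp only [nwdFuel, ne_eq, hab, not_false_eq_true, if_true]
      by_cases hgt : a > b
      · rw [if_pos hgt, ih (a - b) b (by omega) hb (by omega)]
        rw [Int.gcd_sub_self_left]
      · rw [if_neg hgt, ih a (b - a) ha (by omega) (by omega)]
        rw [Int.gcd_sub_self_right]

lemma nwd_eq_gcd (a b : Int) (ha : 0 < a) (hb : 0 < b) :
    nwd a b = ((Int.gcd a b : Nat) : Int) := by
  exact nwdFuel_eq_gcd _ a b ha hb (by omega)

-- Euclid's loop computes the same gcd on nonnegative inputs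
lemma pyGcdFuel_eq_gcd : ∀ (f : Nat) (a b : Int), 0 ≤ a → 0 ≤ b → b.natAbs < f →
    pyGcdFuel f a b = ((Int.gcd a b : Nat) : Int) := by
  intro f
  induction f with
  | zero => intro a b ha hb hf; omega
  | succ f ih =>
    intro a b ha hb hf
    by_cases h0 : b = 0
    · subst h0
      simp only [pyGcdFuel, ne_eq, not_true_eq_false, if_false, Int.gcd_zero_right]
      exact (Int.natAbs_of_nonneg ha).symm
    · have hbpos : 0 < b := by omega
      have h1 := PySem.Int.mod_nonneg a hbpos
      have h2 := PySem.Int.mod_lt a hbpos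
      simp only [pyGcdFuel, ne_eq, h0, not_false_eq_true, if_true]
      rw [ih b (PySem.Int.mod a b) hb h1 (by omega)]
      rw [PySem.Int.mod_eq_emod_of_pos hbpos]
      rw [Int.gcd_comm, Int.gcd_emod]

lemma pyGcd_eq_gcd (a b : Int) (ha : 0 ≤ a) (hb : 0 ≤ b) :
    pyGcd a b = ((Int.gcd a b : Nat) : Int) :=
  pyGcdFuel_eq_gcd _ a b ha hb (by omega)

lemma nwd_eq_pyGcd (a b : Int) (ha : 0 < a) (hb : 0 < b) : nwd a b = pyGcd a b := by
  rw [nwd_eq_gcd a b ha hb, pyGcd_eq_gcd a b (by omega) (by omega)]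

lemma pyGcd_self (a : Int) (ha : 0 < a) : pyGcd a a = a := by
  rw [pyGcd_eq_gcd a a (by omega) (by omega), Int.gcd_self]; omega

lemma pyGcd_pos (a b : Int) (ha : 0 < a) (hb : 0 ≤ b) : 0 < pyGcd a b := by
  rw [pyGcd_eq_gcd a b (by omega) hb]
  have : a.gcd b ≠ 0 := by
    intro h; exact (by omega : a ≠ 0) (Int.eq_zero_of_gcd_eq_zero_left h)
  omega

-- proof-side scanner: Source B-style extension of the run starting at some index, used only to
-- characterise A's quadratic loops (fuel (n - j).toNat counts the remaining indices exactly)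
def bInnerFuel (tab : List Int) (n : Int) : Nat → Int → Int → Int × Int
  | 0, g, j => (j, g)
  | f + 1, g, j =>
    if j < n then
      let ng := pyGcd g (PySem.List.pyGetD tab j 0)
      if ng = 1 then (j, g) else bInnerFuel tab n f ng (j + 1)
    else (j, g)

def bInner (tab : List Int) (n g j : Int) : Int × Int := bInnerFuel tab n (n - j).toNat g j

def bOuterFuel (tab : List Int) (n : Int) : Nat → Int → Int → Int → Int → Int × Int × Int
  | 0, _, bestLen, bestI, bestG => (bestLen, bestI, bestG)
  | f + 1, i, bestLen, bestI, bestG =>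
    if i < n - 1 then
      let r := bInner tab n (PySem.List.pyGetD tab i 0) i
      if r.1 = n then (bestLen, bestI, bestG)
      else if r.1 - i > bestLen then bOuterFuel tab n f (i + 1) (r.1 - i) i r.2
      else bOuterFuel tab n f (i + 1) bestLen bestI bestG
    else (bestLen, bestI, bestG)

def bOuter (tab : List Int) (n i bestLen bestI bestG : Int) : Int × Int × Int :=
  bOuterFuel tab n (n - 1 - i).toNat i bestLen bestI bestG

-- one-step unfolding of the fuelled loops
lemma bInner_step (tab : List Int) (n g j : Int) :
    bInner tab n g j
      = if j < n then
          (if pyGcd g (PySem.List.pyGetD tab j 0) = 1 then (j, g)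
           else bInner tab n (pyGcd g (PySem.List.pyGetD tab j 0)) (j + 1))
        else (j, g) := by
  by_cases h : j < n
  · have hk : (n - j).toNat = ((n - (j + 1)).toNat) + 1 := by omega
    rw [if_pos h]
    show bInnerFuel tab n (n - j).toNat g j = _
    rw [hk]
    simp only [bInnerFuel, if_pos h]
    rfl
  · have hk : (n - j).toNat = 0 := by omega
    rw [if_neg h]
    show bInnerFuel tab n (n - j).toNat g j = _
    rw [hk]
    rfl

lemma bOuter_step (tab : List Int) (n i bestLen bestI bestG : Int) :
    bOuter tab n i bestLen bestI bestG
      = if i < n - 1 then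
          (if (bInner tab n (PySem.List.pyGetD tab i 0) i).1 = n then (bestLen, bestI, bestG)
           else if (bInner tab n (PySem.List.pyGetD tab i 0) i).1 - i > bestLen then
             bOuter tab n (i + 1) ((bInner tab n (PySem.List.pyGetD tab i 0) i).1 - i) i
               (bInner tab n (PySem.List.pyGetD tab i 0) i).2
           else bOuter tab n (i + 1) bestLen bestI bestG)
        else (bestLen, bestI, bestG) := by
  by_cases h : i < n - 1
  · have hk : (n - 1 - i).toNat = ((n - 1 - (i + 1)).toNat) + 1 := by omega
    rw [if_pos h]
    show bOuterFuel tab n (n - 1 - i).toNat i bestLen bestI bestG = _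
    rw [hk]
    simp only [bOuterFuel, if_pos h]
    rfl
  · have hk : (n - 1 - i).toNat = 0 := by omega
    rw [if_neg h]
    show bOuterFuel tab n (n - 1 - i).toNat i bestLen bestI bestG = _
    rw [hk]
    rfl

-- once the cumulative gcd has collapsed to 1 and licznik ≥ licznikTym, the rest of A's inner
-- loop changes nothing
lemma pv_phase2 (tab : List Int) (i : Int) (hpos : ∀ x ∈ tab, 0 < x) :
    ∀ (k : Nat) (j cnt L W I : Int), ((tab.length : Int) - j).toNat = k → 0 ≤ j → cnt ≤ L →
    (PySem.List.pyRange j (tab.length : Int) 1).foldl (aInnerStep tab i) (cnt, 1, L, W, I)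
      = (cnt, 1, L, W, I) := by
  intro k
  induction k with
  | zero =>
    intro j cnt L W I hk h0 hL
    rw [PySem.List.pyRange_one_eq_nil (by omega)]; rfl
  | succ k ih =>
    intro j cnt L W I hk h0 hL
    have hj : j < (tab.length : Int) := by omega
    rw [PySem.List.pyRange_one_cons hj, List.foldl_cons]
    have hx := pv_get_pos tab hpos j h0 hj
    have hg : nwd 1 (PySem.List.pyGetD tab j 0) = 1 := by
      rw [nwd_eq_gcd 1 _ (by omega) hx, Int.one_gcd]; rfl
    simp only [aInnerStep, hg, ne_eq, not_true_eq_false, if_false, not_lt.mpr hL]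
    exact ih (j + 1) cnt L W I (by omega) (by omega) hL

-- A's inner loop, entered at index j with cumulative gcd g, is determined by where (and whether)
-- the scanner bInner exits
lemma pv_innerA (tab : List Int) (i : Int) (hpos : ∀ x ∈ tab, 0 < x) :
    ∀ (k : Nat) (j cnt g L W I : Int), ((tab.length : Int) - j).toNat = k → 0 ≤ j →
    j ≤ (tab.length : Int) → 0 < g →
    (PySem.List.pyRange j (tab.length : Int) 1).foldl (aInnerStep tab i) (cnt, g, L, W, I)
      = (if (bInner tab (tab.length : Int) g j).1 = (tab.length : Int) then
           (cnt + ((tab.length : Int) - j), (bInner tab (tab.length : Int) g j).2, L, W, I)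
         else if L < cnt + ((bInner tab (tab.length : Int) g j).1 - j) then
           (cnt + ((bInner tab (tab.length : Int) g j).1 - j), 1,
            cnt + ((bInner tab (tab.length : Int) g j).1 - j), (bInner tab (tab.length : Int) g j).2, i)
         else (cnt + ((bInner tab (tab.length : Int) g j).1 - j), 1, L, W, I)) := by
  intro k
  induction k with
  | zero =>
    intro j cnt g L W I hk h0 hn hg
    have hj : j = (tab.length : Int) := by omega
    have hb : bInner tab (tab.length : Int) g j = (j, g) := by
      rw [bInner_step, if_neg (by omega : ¬ j < (tab.length : Int))]
    rw [PySem.List.pyRange_one_eq_nil (by omega), hb, List.foldl_nil,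
      if_pos (show ((j, g) : Int × Int).1 = (tab.length : Int) from hj)]
    have hz : cnt + ((tab.length : Int) - j) = cnt := by omega
    rw [hz]
  | succ k ih =>
    intro j cnt g L W I hk h0 hn hg
    have hj : j < (tab.length : Int) := by omega
    have hx := pv_get_pos tab hpos j h0 hj
    have hng : nwd g (PySem.List.pyGetD tab j 0) = pyGcd g (PySem.List.pyGetD tab j 0) :=
      nwd_eq_pyGcd _ _ hg hx
    rw [PySem.List.pyRange_one_cons hj, List.foldl_cons]
    by_cases h1 : pyGcd g (PySem.List.pyGetD tab j 0) = 1
    · have hb : bInner tab (tab.length : Int) g j = (j, g) := by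
        rw [bInner_step, if_pos hj]
        simp [h1]
      have hstep : aInnerStep tab i (cnt, g, L, W, I) j
          = if L < cnt then (cnt, 1, cnt, g, i) else (cnt, 1, L, W, I) := by
        simp only [aInnerStep, hng, h1, ne_eq, not_true_eq_false, if_false]
      rw [hstep, hb]
      have hz : cnt + (j - j) = cnt := by omega
      by_cases hrec : L < cnt
      · rw [if_pos hrec,
          pv_phase2 tab i hpos (((tab.length : Int) - (j + 1)).toNat) (j + 1) cnt cnt g i rfl
            (by omega) (le_refl cnt),
          if_neg (by omega : ¬ (j, g).1 = (tab.length : Int)), if_pos (by simpa [hz] using hrec)]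
        simp [hz]
      · rw [if_neg hrec,
          pv_phase2 tab i hpos (((tab.length : Int) - (j + 1)).toNat) (j + 1) cnt L W I rfl
            (by omega) (by omega),
          if_neg (by omega : ¬ (j, g).1 = (tab.length : Int)),
          if_neg (by simpa [hz] using hrec)]
        simp [hz]
    · have hpg : 0 < pyGcd g (PySem.List.pyGetD tab j 0) := by
        rw [pyGcd_eq_gcd g _ (by omega) (by omega)]
        have : g.gcd (PySem.List.pyGetD tab j 0) ≠ 0 := by
          intro h; exact (by omega : g ≠ 0) (Int.eq_zero_of_gcd_eq_zero_left h)
        omega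
      have hb : bInner tab (tab.length : Int) g j
          = bInner tab (tab.length : Int) (pyGcd g (PySem.List.pyGetD tab j 0)) (j + 1) := by
        rw [bInner_step, if_pos hj]
        simp [h1]
      have hstep : aInnerStep tab i (cnt, g, L, W, I) j
          = (cnt + 1, pyGcd g (PySem.List.pyGetD tab j 0), L, W, I) := by
        simp only [aInnerStep, hng, h1, ne_eq, not_false_eq_true, if_true]
      rw [hstep, hb,
        ih (j + 1) (cnt + 1) _ L W I (by omega) (by omega) (by omega) hpg]
      have e1 : cnt + 1 + ((tab.length : Int) - (j + 1)) = cnt + ((tab.length : Int) - j) := by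
        omega
      have e2 : cnt + 1 + ((bInner tab (tab.length : Int)
          (pyGcd g (PySem.List.pyGetD tab j 0)) (j + 1)).1 - (j + 1))
          = cnt + ((bInner tab (tab.length : Int)
          (pyGcd g (PySem.List.pyGetD tab j 0)) (j + 1)).1 - j) := by omega
      rw [e1, e2]

-- if the run from j with seed g₁ reaches the end of the array, so does the run with any seed g₂
-- that g₁ divides
lemma pv_dvd_end (tab : List Int) (hpos : ∀ x ∈ tab, 0 < x) :
    ∀ (k : Nat) (j g₁ g₂ : Int), ((tab.length : Int) - j).toNat = k → 0 ≤ j → 0 < g₁ → 0 < g₂ →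
    g₁ ∣ g₂ → (bInner tab (tab.length : Int) g₁ j).1 = (tab.length : Int) →
    (bInner tab (tab.length : Int) g₂ j).1 = (tab.length : Int) := by
  intro k
  induction k with
  | zero =>
    intro j g₁ g₂ hk h0 h1 h2 hdvd hend
    rw [bInner_step, if_neg (by omega : ¬ j < (tab.length : Int))]
    rw [bInner_step, if_neg (by omega : ¬ j < (tab.length : Int))] at hend
    exact hend
  | succ k ih =>
    intro j g₁ g₂ hk h0 h1 h2 hdvd hend
    have hj : j < (tab.length : Int) := by omega
    have hx := pv_get_pos tab hpos j h0 hj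
    rw [bInner_step, if_pos hj] at hend
    rw [bInner_step, if_pos hj]
    have hgg : ((Int.gcd g₁ (PySem.List.pyGetD tab j 0) : Nat) : Int)
        ∣ ((Int.gcd g₂ (PySem.List.pyGetD tab j 0) : Nat) : Int) := by
      exact_mod_cast Int.gcd_dvd_gcd_of_dvd_left _ hdvd
    rw [pyGcd_eq_gcd g₁ _ (by omega) (by omega)] at hend
    rw [pyGcd_eq_gcd g₂ _ (by omega) (by omega)]
    have hne1 : ((Int.gcd g₁ (PySem.List.pyGetD tab j 0) : Nat) : Int) ≠ 1 := by
      intro h; rw [h] at hend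
      rw [if_pos rfl] at hend; omega
    rw [if_neg hne1] at hend
    have hpos1 : 0 < ((Int.gcd g₁ (PySem.List.pyGetD tab j 0) : Nat) : Int) := by
      have : g₁.gcd (PySem.List.pyGetD tab j 0) ≠ 0 := by
        intro h; exact (by omega : g₁ ≠ 0) (Int.eq_zero_of_gcd_eq_zero_left h)
      omega
    have hpos2 : 0 < ((Int.gcd g₂ (PySem.List.pyGetD tab j 0) : Nat) : Int) := by
      have : g₂.gcd (PySem.List.pyGetD tab j 0) ≠ 0 := by
        intro h; exact (by omega : g₂ ≠ 0) (Int.eq_zero_of_gcd_eq_zero_left h)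
      omega
    have hne2 : ((Int.gcd g₂ (PySem.List.pyGetD tab j 0) : Nat) : Int) ≠ 1 := by
      intro h; rw [h] at hgg
      have := Int.le_of_dvd (by omega) hgg
      omega
    rw [if_neg hne2]
    exact ih (j + 1) _ _ (by omega) (by omega) hpos1 hpos2 hgg hend

-- if the run starting at i reaches the end of the array, so does the run starting at i + 1
lemma pv_mono (tab : List Int) (hpos : ∀ x ∈ tab, 0 < x) (i : Int) (h0 : 0 ≤ i)
    (hi : i < (tab.length : Int) - 1)
    (hend : (bInner tab (tab.length : Int) (PySem.List.pyGetD tab i 0) i).1 = (tab.length : Int)) :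
    (bInner tab (tab.length : Int) (PySem.List.pyGetD tab (i + 1) 0) (i + 1)).1
      = (tab.length : Int) := by
  have hxi := pv_get_pos tab hpos i h0 (by omega)
  have hxi1 := pv_get_pos tab hpos (i + 1) (by omega) (by omega)
  rw [bInner_step, if_pos (by omega : i < (tab.length : Int)), pyGcd_self _ hxi] at hend
  have hne_i : PySem.List.pyGetD tab i 0 ≠ 1 := by
    intro h; rw [if_pos h] at hend; omega
  rw [if_neg hne_i] at hend
  rw [bInner_step, if_pos (by omega : i + 1 < (tab.length : Int))] at hend
  rw [pyGcd_eq_gcd _ _ (by omega) (by omega)] at hend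
  have hg1 := Int.gcd_dvd_right (PySem.List.pyGetD tab i 0) (PySem.List.pyGetD tab (i + 1) 0)
  have hgpos : 0 < ((Int.gcd (PySem.List.pyGetD tab i 0) (PySem.List.pyGetD tab (i + 1) 0) : Nat) : Int) := by
    have : (PySem.List.pyGetD tab i 0).gcd (PySem.List.pyGetD tab (i + 1) 0) ≠ 0 := by
      intro h
      exact (by omega : PySem.List.pyGetD tab i 0 ≠ 0) (Int.eq_zero_of_gcd_eq_zero_left h)
    omega
  have hne_g : ((Int.gcd (PySem.List.pyGetD tab i 0) (PySem.List.pyGetD tab (i + 1) 0) : Nat) : Int) ≠ 1 := by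
    intro h; rw [if_pos h] at hend; omega
  rw [if_neg hne_g] at hend
  rw [bInner_step, if_pos (by omega : i + 1 < (tab.length : Int)), pyGcd_self _ hxi1]
  have hne_i1 : PySem.List.pyGetD tab (i + 1) 0 ≠ 1 := by
    intro h
    apply hne_g
    rw [h, Int.gcd_one_right]; rfl
  rw [if_neg hne_i1]
  exact pv_dvd_end tab hpos (((tab.length : Int) - (i + 1 + 1)).toNat) (i + 1 + 1) _ _ rfl
    (by omega) hgpos hxi1 hg1 hend

-- from a start whose run reaches the end of the array, the rest of A's outer loop records nothing
lemma pv_dead (tab : List Int) (hpos : ∀ x ∈ tab, 0 < x) :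
    ∀ (k : Nat) (i L W I : Int), ((tab.length : Int) - 1 - i).toNat = k → 0 ≤ i →
    (bInner tab (tab.length : Int) (PySem.List.pyGetD tab i 0) i).1 = (tab.length : Int) →
    (PySem.List.pyRange i ((tab.length : Int) - 1) 1).foldl (aOuterStep tab (tab.length : Int)) (L, W, I)
      = (L, W, I) := by
  intro k
  induction k with
  | zero =>
    intro i L W I hk h0 hend
    rw [PySem.List.pyRange_one_eq_nil (by omega)]; rfl
  | succ k ih =>
    intro i L W I hk h0 hend
    have hi : i < (tab.length : Int) - 1 := by omega
    have hxi := pv_get_pos tab hpos i h0 (by omega)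
    rw [PySem.List.pyRange_one_cons hi, List.foldl_cons]
    have hstep : aOuterStep tab (tab.length : Int) (L, W, I) i = (L, W, I) := by
      unfold aOuterStep
      rw [pv_innerA tab i hpos (((tab.length : Int) - i).toNat) i 0 _ L W I rfl h0 (by omega) hxi]
      simp [hend]
    rw [hstep]
    exact ih (i + 1) L W I (by omega) (by omega) (pv_mono tab hpos i h0 hi hend)

-- A's outer loop from start i computes exactly what the scanner-based loop bOuter computes
-- (components permuted: A keeps (licznik, wspolnyDzielnik, indeks), bOuter (len, start, g))
lemma pv_outer (tab : List Int) (hpos : ∀ x ∈ tab, 0 < x) :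
    ∀ (k : Nat) (i L W I : Int), ((tab.length : Int) - 1 - i).toNat = k → 0 ≤ i →
    (PySem.List.pyRange i ((tab.length : Int) - 1) 1).foldl (aOuterStep tab (tab.length : Int)) (L, W, I)
      = ((bOuter tab (tab.length : Int) i L I W).1,
         (bOuter tab (tab.length : Int) i L I W).2.2,
         (bOuter tab (tab.length : Int) i L I W).2.1) := by
  intro k
  induction k with
  | zero =>
    intro i L W I hk h0
    rw [PySem.List.pyRange_one_eq_nil (by omega), bOuter_step,
      if_neg (by omega : ¬ i < (tab.length : Int) - 1)]
    rfl
  | succ k ih =>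
    intro i L W I hk h0
    have hi : i < (tab.length : Int) - 1 := by omega
    have hxi := pv_get_pos tab hpos i h0 (by omega)
    rw [PySem.List.pyRange_one_cons hi, List.foldl_cons, bOuter_step, if_pos hi]
    have hstep : aOuterStep tab (tab.length : Int) (L, W, I) i
        = (if (bInner tab (tab.length : Int) (PySem.List.pyGetD tab i 0) i).1 = (tab.length : Int)
           then (L, W, I)
           else if L < (bInner tab (tab.length : Int) (PySem.List.pyGetD tab i 0) i).1 - i
           then ((bInner tab (tab.length : Int) (PySem.List.pyGetD tab i 0) i).1 - i,
                 (bInner tab (tab.length : Int) (PySem.List.pyGetD tab i 0) i).2, i)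
           else (L, W, I)) := by
      unfold aOuterStep
      rw [pv_innerA tab i hpos (((tab.length : Int) - i).toNat) i 0 _ L W I rfl h0 (by omega) hxi]
      by_cases hend : (bInner tab (tab.length : Int) (PySem.List.pyGetD tab i 0) i).1 = (tab.length : Int)
      · simp [hend]
      · by_cases hrec : L < (bInner tab (tab.length : Int) (PySem.List.pyGetD tab i 0) i).1 - i
        · simp [hend, hrec]
        · simp [hend, hrec]
    rw [hstep]
    by_cases hend : (bInner tab (tab.length : Int) (PySem.List.pyGetD tab i 0) i).1 = (tab.length : Int)
    · rw [if_pos hend, if_pos hend]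
      exact pv_dead tab hpos k (i + 1) L W I (by omega) (by omega)
        (pv_mono tab hpos i h0 hi hend)
    · rw [if_neg hend, if_neg hend]
      by_cases hrec : L < (bInner tab (tab.length : Int) (PySem.List.pyGetD tab i 0) i).1 - i
      · rw [if_pos hrec, if_pos (show (bInner tab (tab.length : Int) (PySem.List.pyGetD tab i 0) i).1 - i > L from hrec)]
        exact ih (i + 1) _ _ _ (by omega) (by omega)
      · rw [if_neg hrec, if_neg (show ¬ (bInner tab (tab.length : Int) (PySem.List.pyGetD tab i 0) i).1 - i > L from hrec)]
        exact ih (i + 1) L W I (by omega) (by omega)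

-- ===== bridge between the scanner and B's sweep =====

-- cumulative gcd of the run starting at s, after absorbing indices s..p-1 (the seed tab[s] if p ≤ s)
def cgp (tab : List Int) (s p : Int) : Int :=
  (PySem.List.pyRange s p 1).foldl (fun g j => pyGcd g (PySem.List.pyGetD tab j 0))
    (PySem.List.pyGetD tab s 0)

-- death index and final gcd of the run starting at s
def dI (tab : List Int) (s : Int) : Int :=
  (bInner tab (tab.length : Int) (PySem.List.pyGetD tab s 0) s).1
def gI (tab : List Int) (s : Int) : Int :=
  (bInner tab (tab.length : Int) (PySem.List.pyGetD tab s 0) s).2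

lemma cgp_of_le (tab : List Int) (s p : Int) (h : p ≤ s) :
    cgp tab s p = PySem.List.pyGetD tab s 0 := by
  unfold cgp; rw [PySem.List.pyRange_one_eq_nil h]; rfl

lemma cgp_succ (tab : List Int) (s p : Int) (h : s ≤ p) :
    cgp tab s (p + 1) = pyGcd (cgp tab s p) (PySem.List.pyGetD tab p 0) := by
  unfold cgp
  rw [PySem.List.pyRange_one_succ_right h, List.foldl_append]
  rfl

lemma cgp_pos (tab : List Int) (hpos : ∀ x ∈ tab, 0 < x) :
    ∀ (k : Nat) (s p : Int), (p - s).toNat = k → 0 ≤ s → s < (tab.length : Int) →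
    p ≤ (tab.length : Int) → 0 < cgp tab s p := by
  intro k
  induction k with
  | zero =>
    intro s p hk h0 h1 h2
    rw [cgp_of_le tab s p (by omega)]
    exact pv_get_pos tab hpos s h0 h1
  | succ k ih =>
    intro s p hk h0 h1 h2
    have hsp : s ≤ p - 1 := by omega
    have : p = (p - 1) + 1 := by omega
    rw [this, cgp_succ tab s (p - 1) hsp]
    exact pyGcd_pos _ _ (ih s (p - 1) (by omega) h0 h1 (by omega))
      (le_of_lt (pv_get_pos tab hpos (p - 1) (by omega) (by omega)))

-- once the cumulative gcd is 1 it stays 1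
lemma cgp_one_mono (tab : List Int) (hpos : ∀ x ∈ tab, 0 < x) :
    ∀ (k : Nat) (s q p : Int), (p - q).toNat = k → 0 ≤ s → s < (tab.length : Int) →
    p ≤ (tab.length : Int) → q ≤ p → cgp tab s q = 1 → cgp tab s p = 1 := by
  intro k
  induction k with
  | zero =>
    intro s q p hk h0 h1 h2 hqp hone
    have : q = p := by omega
    rwa [← this]
  | succ k ih =>
    intro s q p hk h0 h1 h2 hqp hone
    have hq1 : cgp tab s (q + 1) = 1 := by
      by_cases hc : q < s
      · rw [cgp_of_le tab s (q + 1) (by omega)]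
        rw [cgp_of_le tab s q (by omega)] at hone
        exact hone
      · rw [cgp_succ tab s q (by omega), hone,
          pyGcd_eq_gcd 1 _ (by omega)
            (le_of_lt (pv_get_pos tab hpos q (by omega) (by omega))),
          Int.one_gcd]
        rfl
    exact ih s (q + 1) p (by omega) h0 h1 h2 (by omega) hq1

-- the cumulative gcd of a longer run divides that of a shorter run with later start
lemma cgp_dvd (tab : List Int) (hpos : ∀ x ∈ tab, 0 < x) (s s' : Int) (hss : s ≤ s') (h0 : 0 ≤ s) :
    ∀ (k : Nat) (p : Int), (p - (s' + 1)).toNat = k → s' < p → p ≤ (tab.length : Int) →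
    cgp tab s p ∣ cgp tab s' p := by
  intro k
  induction k with
  | zero =>
    intro p hk h1 h2
    have hp : p = s' + 1 := by omega
    subst hp
    have hx := pv_get_pos tab hpos s' (by omega) (by omega)
    rw [cgp_succ tab s' s' (le_refl s'), cgp_of_le tab s' s' (le_refl s'), pyGcd_self _ hx]
    rw [cgp_succ tab s s' hss]
    rw [pyGcd_eq_gcd _ _ (le_of_lt (cgp_pos tab hpos _ s s' rfl h0 (by omega) (by omega))) (by omega)]
    exact Int.gcd_dvd_right _ _
  | succ k ih =>
    intro p hk h1 h2
    have hp : p = (p - 1) + 1 := by omega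
    rw [hp, cgp_succ tab s (p - 1) (by omega), cgp_succ tab s' (p - 1) (by omega)]
    have hx := pv_get_pos tab hpos (p - 1) (by omega) (by omega)
    have hd := ih (p - 1) (by omega) (by omega) (by omega)
    rw [pyGcd_eq_gcd _ _ (le_of_lt (cgp_pos tab hpos _ s (p-1) rfl h0 (by omega) (by omega))) (by omega),
      pyGcd_eq_gcd _ _ (le_of_lt (cgp_pos tab hpos _ s' (p-1) rfl (by omega) (by omega) (by omega))) (by omega)]
    exact_mod_cast Int.gcd_dvd_gcd_of_dvd_left _ hd

-- full characterisation of the scanner in terms of cumulative gcds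
lemma bInner_char (tab : List Int) (hpos : ∀ x ∈ tab, 0 < x) (s : Int) (hs0 : 0 ≤ s)
    (hsn : s < (tab.length : Int)) :
    ∀ (k : Nat) (j : Int), ((tab.length : Int) - j).toNat = k → s ≤ j → j ≤ (tab.length : Int) →
    j ≤ (bInner tab (tab.length : Int) (cgp tab s j) j).1 ∧
    (bInner tab (tab.length : Int) (cgp tab s j) j).1 ≤ (tab.length : Int) ∧
    (∀ q, j ≤ q → q < (bInner tab (tab.length : Int) (cgp tab s j) j).1 → cgp tab s (q + 1) ≠ 1) ∧
    ((bInner tab (tab.length : Int) (cgp tab s j) j).1 < (tab.length : Int) →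
      cgp tab s ((bInner tab (tab.length : Int) (cgp tab s j) j).1 + 1) = 1) ∧
    (bInner tab (tab.length : Int) (cgp tab s j) j).2
      = cgp tab s (bInner tab (tab.length : Int) (cgp tab s j) j).1 := by
  intro k
  induction k with
  | zero =>
    intro j hk h1 h2
    have hb : bInner tab (tab.length : Int) (cgp tab s j) j = (j, cgp tab s j) := by
      rw [bInner_step, if_neg (by omega : ¬ j < (tab.length : Int))]
    rw [hb]
    refine ⟨le_refl j, by omega, by omega, by omega, rfl⟩
  | succ k ih =>
    intro j hk h1 h2
    have hj : j < (tab.length : Int) := by omega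
    have hng : pyGcd (cgp tab s j) (PySem.List.pyGetD tab j 0) = cgp tab s (j + 1) :=
      (cgp_succ tab s j h1).symm
    by_cases h1c : cgp tab s (j + 1) = 1
    · have hb : bInner tab (tab.length : Int) (cgp tab s j) j = (j, cgp tab s j) := by
        rw [bInner_step, if_pos hj, hng, if_pos h1c]
      rw [hb]
      exact ⟨le_refl j, by omega, by omega, fun _ => h1c, rfl⟩
    · have hb : bInner tab (tab.length : Int) (cgp tab s j) j
          = bInner tab (tab.length : Int) (cgp tab s (j + 1)) (j + 1) := by
        rw [bInner_step, if_pos hj, hng, if_neg h1c]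
      obtain ⟨ha1, ha2, ha3, ha4, ha5⟩ := ih (j + 1) (by omega) (by omega) (by omega)
      rw [hb]
      refine ⟨by omega, ha2, ?_, ha4, ha5⟩
      intro q hq1 hq2
      by_cases hqj : q = j
      · subst hqj; exact h1c
      · exact ha3 q (by omega) hq2

-- the run starting at s: bounds, no collapse before its death, collapse at its death, final gcd
lemma dI_char (tab : List Int) (hpos : ∀ x ∈ tab, 0 < x) (s : Int) (hs0 : 0 ≤ s)
    (hsn : s < (tab.length : Int)) :
    s ≤ dI tab s ∧ dI tab s ≤ (tab.length : Int) ∧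
    (∀ q, s ≤ q → q < dI tab s → cgp tab s (q + 1) ≠ 1) ∧
    (dI tab s < (tab.length : Int) → cgp tab s (dI tab s + 1) = 1) ∧
    gI tab s = cgp tab s (dI tab s) := by
  have h := bInner_char tab hpos s hs0 hsn (((tab.length : Int) - s).toNat) s rfl (le_refl s)
    (by omega)
  rw [cgp_of_le tab s s (le_refl s)] at h
  exact h

lemma cgp_ne_one_iff (tab : List Int) (hpos : ∀ x ∈ tab, 0 < x) (s q : Int) (hs0 : 0 ≤ s)
    (hsq : s < q) (hq : q ≤ (tab.length : Int)) :
    cgp tab s q ≠ 1 ↔ q ≤ dI tab s := by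
  obtain ⟨hge, hle, h1, h2, _⟩ := dI_char tab hpos s hs0 (by omega)
  constructor
  · intro hne
    by_contra hcon
    push_neg at hcon
    have hone := h2 (by omega)
    exact hne (cgp_one_mono tab hpos ((q - (dI tab s + 1)).toNat) s (dI tab s + 1) q rfl hs0
      (by omega) hq (by omega) hone)
  · intro hle'
    have := h1 (q - 1) (by omega) (by omega)
    rwa [show q - 1 + 1 = q by omega] at this

lemma dI_mono (tab : List Int) (hpos : ∀ x ∈ tab, 0 < x) (s s' : Int) (h0 : 0 ≤ s)
    (hss : s ≤ s') (hs'n : s' < (tab.length : Int)) : dI tab s ≤ dI tab s' := by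
  obtain ⟨hge, hle, h1, _, _⟩ := dI_char tab hpos s h0 (by omega)
  obtain ⟨hge', hle', _, h2', _⟩ := dI_char tab hpos s' (by omega) hs'n
  by_contra hcon
  push_neg at hcon
  have hq : dI tab s' < (tab.length : Int) := by omega
  have hone := h2' hq
  have hdvd := cgp_dvd tab hpos s s' hss h0 ((dI tab s' + 1 - (s' + 1)).toNat) (dI tab s' + 1)
    rfl (by omega) (by omega)
  rw [hone] at hdvd
  have hp := cgp_pos tab hpos ((dI tab s' + 1 - s).toNat) s (dI tab s' + 1) rfl h0 (by omega)
    (by omega)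
  have hle1 := Int.le_of_dvd one_pos hdvd
  have : cgp tab s (dI tab s' + 1) = 1 := by omega
  exact h1 (dI tab s') (by omega) (by omega) this

-- ===== the sweep, specified =====

-- record applied when a run dies exactly at index p
def DpF (tab : List Int) (p : Int) (b : Int × Int × Int) (s : Int) : Int × Int × Int :=
  if dI tab s = p ∧ p - s > b.1 then (p - s, s, gI tab s) else b

-- all records of runs dying before q, in start order
def FpF (tab : List Int) (q : Int) (b : Int × Int × Int) (s : Int) : Int × Int × Int :=
  if dI tab s < q ∧ dI tab s - s > b.1 then (dI tab s - s, s, gI tab s) else b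

-- the alive list after the first p elements
def avf (tab : List Int) (p s : Int) : Option (Int × Int) :=
  if p ≤ dI tab s then some (s, cgp tab s p) else none
def aliveSpec (tab : List Int) (p : Int) : List (Int × Int) :=
  (PySem.List.pyRange 0 p 1).filterMap (avf tab p)

-- best-component and survivor-component of Source B's inner loop body
def bupdB (x j : Int) (b : Int × Int × Int) (sg : Int × Int) : Int × Int × Int :=
  if pyGcd sg.2 x ≠ 1 then b else if j - sg.1 > b.1 then (j - sg.1, sg.1, sg.2) else b
def svf (x : Int) (sg : Int × Int) : Option (Int × Int) :=
  if pyGcd sg.2 x ≠ 1 then some (sg.1, pyGcd sg.2 x) else none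

lemma foldl_id_of {α β : Type} (f : β → α → β) (l : List α) (b : β)
    (h : ∀ b' x, x ∈ l → f b' x = b') : l.foldl f b = b := by
  induction l generalizing b with
  | nil => rfl
  | cons a t ih =>
    rw [List.foldl_cons, h b a (by simp)]
    exact ih b (fun b' x hx => h b' x (by simp [hx]))

lemma pv_foldl_filterMap {α β γ : Type} (g : α → Option β) (f : γ → β → γ) :
    ∀ (l : List α) (init : γ),
    (l.filterMap g).foldl f init = l.foldl (fun c a => (g a).elim c (f c)) init := by
  intro l
  induction l with
  | nil => intro init; rfl
  | cons a t ih =>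
    intro init
    cases h : g a <;> simp [List.filterMap_cons, h, ih]

-- the inner loop of Source B splits into its two independent components
lemma pv_inner_split (x j : Int) :
    ∀ (l : List (Int × Int)) (b : Int × Int × Int) (acc : List (Int × Int)),
    l.foldl (bInnerStepB x j) (b, acc) = (l.foldl (bupdB x j) b, acc ++ l.filterMap (svf x)) := by
  intro l
  induction l with
  | nil => intro b acc; simp
  | cons sg t ih =>
    intro b acc
    rw [List.foldl_cons, List.foldl_cons]
    by_cases h : pyGcd sg.2 x = 1
    · have hstep : bInnerStepB x j (b, acc) sg = (bupdB x j b sg, acc) := by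
        simp only [bInnerStepB, bupdB, h, ne_eq, not_true_eq_false, if_false]
        by_cases h2 : j - sg.1 > b.1 <;> simp [h2]
      rw [hstep, ih, List.filterMap_cons]
      simp [svf, h]
    · have hstep : bInnerStepB x j (b, acc) sg = (b, acc ++ [(sg.1, pyGcd sg.2 x)]) := by
        simp [bInnerStepB, h]
      have hupd : bupdB x j b sg = b := by simp [bupdB, h]
      rw [hstep, ih, hupd, List.filterMap_cons]
      simp [svf, h]

-- the list Source B's inner loop walks at step p is the alive-or-new list, as one filterMap
lemma pv_avlist (tab : List Int) (hpos : ∀ x ∈ tab, 0 < x) (p : Int) (h0 : 0 ≤ p)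
    (hpn : p < (tab.length : Int)) :
    aliveSpec tab p ++ [(p, PySem.List.pyGetD tab p 0)]
      = (PySem.List.pyRange 0 (p + 1) 1).filterMap (avf tab p) := by
  unfold aliveSpec
  rw [PySem.List.pyRange_one_succ_right h0, List.filterMap_append]
  have h1 : avf tab p p = some (p, PySem.List.pyGetD tab p 0) := by
    unfold avf
    rw [if_pos (dI_char tab hpos p h0 hpn).1, cgp_of_le tab p p (le_refl p)]
  simp [h1]

-- survivors of step p are exactly the alive list after p + 1 elements
lemma pv_survivors (tab : List Int) (hpos : ∀ x ∈ tab, 0 < x) (p : Int) (h0 : 0 ≤ p)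
    (hpn : p < (tab.length : Int)) :
    ((PySem.List.pyRange 0 (p + 1) 1).filterMap (avf tab p)).filterMap
        (svf (PySem.List.pyGetD tab p 0))
      = aliveSpec tab (p + 1) := by
  rw [List.filterMap_filterMap]
  unfold aliveSpec
  apply List.filterMap_congr
  intro s hs
  obtain ⟨hs0, hsp⟩ := PySem.List.mem_pyRange_one.mp hs
  by_cases hd : p ≤ dI tab s
  · have hsucc : pyGcd (cgp tab s p) (PySem.List.pyGetD tab p 0) = cgp tab s (p + 1) :=
      (cgp_succ tab s p (by omega)).symm
    have hiff := cgp_ne_one_iff tab hpos s (p + 1) hs0 (by omega) (by omega)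
    simp only [avf, if_pos hd, Option.bind_some, svf, hsucc]
    by_cases halive : cgp tab s (p + 1) = 1
    · rw [if_neg (by simp [halive]), if_neg (by rw [← hiff]; simp [halive])]
    · rw [if_pos (by simp [halive]), if_pos (hiff.mp halive)]
  · simp only [avf, if_neg hd, Option.bind_none]
    rw [if_neg (by omega)]

-- the best-updates of step p are the death records of index p
lemma pv_deadfold (tab : List Int) (hpos : ∀ x ∈ tab, 0 < x) (p : Int) (h0 : 0 ≤ p)
    (hpn : p < (tab.length : Int)) (b : Int × Int × Int) :
    ((PySem.List.pyRange 0 (p + 1) 1).filterMap (avf tab p)).foldl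
        (bupdB (PySem.List.pyGetD tab p 0) p) b
      = (PySem.List.pyRange 0 (p + 1) 1).foldl (DpF tab p) b := by
  rw [pv_foldl_filterMap]
  apply PySem.List.foldl_congr_mem
  intro acc s hs
  obtain ⟨hs0, hsp⟩ := PySem.List.mem_pyRange_one.mp hs
  obtain ⟨hge, hle, _, _, hgI⟩ := dI_char tab hpos s hs0 (by omega)
  by_cases hd : p ≤ dI tab s
  · have hsucc : pyGcd (cgp tab s p) (PySem.List.pyGetD tab p 0) = cgp tab s (p + 1) :=
      (cgp_succ tab s p (by omega)).symm
    have hiff := cgp_ne_one_iff tab hpos s (p + 1) hs0 (by omega) (by omega)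
    simp only [avf, if_pos hd, Option.elim_some]
    unfold bupdB DpF
    simp only [hsucc]
    by_cases halive : cgp tab s (p + 1) = 1
    · have hdead : dI tab s = p := by
        have : ¬ (p + 1 ≤ dI tab s) := by rw [← hiff]; simp [halive]
        omega
      rw [if_neg (by simp [halive])]
      have hval : cgp tab s p = gI tab s := by rw [hgI, hdead]
      by_cases hrec : p - s > acc.1
      · rw [if_pos hrec, if_pos ⟨hdead, hrec⟩, hval]
      · rw [if_neg hrec, if_neg (by rintro ⟨_, h⟩; exact hrec h)]
    · have hne : p + 1 ≤ dI tab s := hiff.mp halive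
      rw [if_pos (by simp [halive]), if_neg (by rintro ⟨h, _⟩; omega)]
  · simp only [avf, if_neg hd, Option.elim_none]
    unfold DpF
    rw [if_neg (by rintro ⟨h, _⟩; omega)]

-- indices past p contribute no death record at p
lemma pv_deadext (tab : List Int) (hpos : ∀ x ∈ tab, 0 < x) (p : Int) (h0 : 0 ≤ p)
    (hpn : p < (tab.length : Int)) (b : Int × Int × Int) :
    (PySem.List.pyRange 0 (p + 1) 1).foldl (DpF tab p) b
      = (PySem.List.pyRange 0 (tab.length : Int) 1).foldl (DpF tab p) b := by
  rw [PySem.List.pyRange_one_append 0 (p + 1) (tab.length : Int) (by omega) (by omega),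
    List.foldl_append]
  symm
  apply foldl_id_of
  intro b' s hs
  obtain ⟨hs0, hsn⟩ := PySem.List.mem_pyRange_one.mp hs
  obtain ⟨hge, _, _, _, _⟩ := dI_char tab hpos s (by omega) (by omega)
  unfold DpF
  rw [if_neg (by rintro ⟨h, _⟩; omega)]

-- applying the death records of index p after all earlier records, in start order, is the same
-- as merging them into the start-ordered fold: death indices are monotone in the start
lemma pv_GS (tab : List Int) (hpos : ∀ x ∈ tab, 0 < x) (p : Int) (hp0 : 0 ≤ p)
    (hpn : p < (tab.length : Int)) :
    ∀ (k : Nat) (a : Int) (b : Int × Int × Int), ((tab.length : Int) - a).toNat = k → 0 ≤ a →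
    (PySem.List.pyRange a (tab.length : Int) 1).foldl (FpF tab (p + 1)) b
      = (PySem.List.pyRange a (tab.length : Int) 1).foldl (DpF tab p)
          ((PySem.List.pyRange a (tab.length : Int) 1).foldl (FpF tab p) b) := by
  intro k
  induction k with
  | zero =>
    intro a b hk h0
    rw [PySem.List.pyRange_one_eq_nil (by omega)]
    rfl
  | succ k ih =>
    intro a b hk h0
    have ha : a < (tab.length : Int) := by omega
    obtain ⟨hge, hle, _, _, _⟩ := dI_char tab hpos a h0 ha
    have tailid : ∀ (b' : Int × Int × Int), p ≤ dI tab a →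
        (PySem.List.pyRange (a + 1) (tab.length : Int) 1).foldl (FpF tab p) b' = b' := by
      intro b' hpa
      apply foldl_id_of
      intro b'' s hs
      obtain ⟨hs1, hs2⟩ := PySem.List.mem_pyRange_one.mp hs
      have := dI_mono tab hpos a s h0 (by omega) hs2
      unfold FpF
      rw [if_neg (by rintro ⟨h, _⟩; omega)]
    rw [PySem.List.pyRange_one_cons ha]
    simp only [List.foldl_cons]
    rcases lt_trichotomy (dI tab a) p with hc | hc | hc
    · have hF : FpF tab p b a = FpF tab (p + 1) b a := by
        unfold FpF
        by_cases h2 : dI tab a - a > b.1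
        · rw [if_pos ⟨hc, h2⟩, if_pos ⟨by omega, h2⟩]
        · rw [if_neg (by rintro ⟨_, h⟩; exact h2 h), if_neg (by rintro ⟨_, h⟩; exact h2 h)]
      have hD : ∀ b', DpF tab p b' a = b' := by
        intro b'; unfold DpF; rw [if_neg (by rintro ⟨h, _⟩; omega)]
      rw [hD, ← hF, ih (a + 1) (FpF tab p b a) (by omega) (by omega)]
    · have hb1 : FpF tab (p + 1) b a = DpF tab p b a := by
        unfold FpF DpF
        rw [hc]
        by_cases h2 : p - a > b.1
        · rw [if_pos ⟨by omega, h2⟩, if_pos ⟨rfl, h2⟩]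
        · rw [if_neg (by rintro ⟨_, h⟩; exact h2 h), if_neg (by rintro ⟨_, h⟩; exact h2 h)]
      have hFa : FpF tab p b a = b := by
        unfold FpF; rw [if_neg (by rintro ⟨h, _⟩; omega)]
      rw [hFa, tailid b (by omega), hb1,
        ih (a + 1) (DpF tab p b a) (by omega) (by omega),
        tailid (DpF tab p b a) (by omega)]
    · have hFa : FpF tab p b a = b := by
        unfold FpF; rw [if_neg (by rintro ⟨h, _⟩; omega)]
      have hFa1 : FpF tab (p + 1) b a = b := by
        unfold FpF; rw [if_neg (by rintro ⟨h, _⟩; omega)]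
      have hD : ∀ b', DpF tab p b' a = b' := by
        intro b'; unfold DpF; rw [if_neg (by rintro ⟨h, _⟩; omega)]
      rw [hFa, hFa1, hD, ih (a + 1) b (by omega) (by omega)]

-- the sweep of Source B computes, after p steps, the start-ordered fold of all records that have
-- died so far, together with the alive list
lemma pv_sweep (tab : List Int) (hpos : ∀ x ∈ tab, 0 < x) :
    ∀ (k : Nat) (p : Int), p.toNat = k → 0 ≤ p → p ≤ (tab.length : Int) →
    (PySem.List.pyRange 0 p 1).foldl (bStepB tab) ((0, 0, 0), ([] : List (Int × Int)))
      = ((PySem.List.pyRange 0 (tab.length : Int) 1).foldl (FpF tab p) (0, 0, 0),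
         aliveSpec tab p) := by
  intro k
  induction k with
  | zero =>
    intro p hk h0 h1
    have hp : p = 0 := by omega
    subst hp
    rw [PySem.List.pyRange_one_eq_nil (by omega)]
    have hbest : (PySem.List.pyRange 0 (tab.length : Int) 1).foldl (FpF tab 0) (0, 0, 0)
        = ((0 : Int), (0 : Int), (0 : Int)) := by
      apply foldl_id_of
      intro b' s hs
      obtain ⟨hs1, hs2⟩ := PySem.List.mem_pyRange_one.mp hs
      obtain ⟨hge, _, _, _, _⟩ := dI_char tab hpos s hs1 hs2
      unfold FpF
      rw [if_neg (by rintro ⟨h, _⟩; omega)]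
    rw [hbest]
    unfold aliveSpec
    rw [PySem.List.pyRange_one_eq_nil (by omega)]
    rfl
  | succ k ih =>
    intro p hk h0 h1
    have hp : p = (p - 1) + 1 := by omega
    rw [hp, PySem.List.pyRange_one_succ_right (by omega), List.foldl_append,
      ih (p - 1) (by omega) (by omega) (by omega)]
    simp only [List.foldl_cons, List.foldl_nil]
    rw [show bStepB tab
        ((PySem.List.pyRange 0 (tab.length : Int) 1).foldl (FpF tab (p - 1)) (0, 0, 0),
          aliveSpec tab (p - 1)) (p - 1)
        = ((aliveSpec tab (p - 1) ++ [(p - 1, PySem.List.pyGetD tab (p - 1) 0)]).foldl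
            (bInnerStepB (PySem.List.pyGetD tab (p - 1) 0) (p - 1))
            ((PySem.List.pyRange 0 (tab.length : Int) 1).foldl (FpF tab (p - 1)) (0, 0, 0), []))
        from rfl]
    rw [pv_avlist tab hpos (p - 1) (by omega) (by omega),
      pv_inner_split (PySem.List.pyGetD tab (p - 1) 0) (p - 1)]
    rw [pv_survivors tab hpos (p - 1) (by omega) (by omega),
      pv_deadfold tab hpos (p - 1) (by omega) (by omega),
      pv_deadext tab hpos (p - 1) (by omega) (by omega),
      ← pv_GS tab hpos (p - 1) (by omega) (by omega) ((tab.length : Int) - 0).toNat 0 (0, 0, 0)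
        rfl (le_refl 0)]
    simp

-- the best length never goes negative
lemma pv_NN (tab : List Int) (hpos : ∀ x ∈ tab, 0 < x) (q : Int) :
    ∀ (l : List Int), (∀ s ∈ l, 0 ≤ s ∧ s < (tab.length : Int)) →
    ∀ (b : Int × Int × Int), 0 ≤ b.1 → 0 ≤ (l.foldl (FpF tab q) b).1 := by
  intro l
  induction l with
  | nil => intro _ b hb; exact hb
  | cons a t ih =>
    intro hmem b hb
    rw [List.foldl_cons]
    apply ih (fun s hs => hmem s (by simp [hs]))
    obtain ⟨h0, h1⟩ := hmem a (by simp)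
    obtain ⟨hge, _, _, _, _⟩ := dI_char tab hpos a h0 h1
    unfold FpF
    by_cases hc : dI tab a < q ∧ dI tab a - a > b.1
    · rw [if_pos hc]; dsimp; omega
    · rw [if_neg hc]; exact hb

-- A's scanner loop bOuter is the start-ordered fold of all death records
lemma pv_L1 (tab : List Int) (hpos : ∀ x ∈ tab, 0 < x) :
    ∀ (k : Nat) (i bL bI bG : Int), ((tab.length : Int) - 1 - i).toNat = k → 0 ≤ i →
    bOuter tab (tab.length : Int) i bL bI bG
      = (PySem.List.pyRange i ((tab.length : Int) - 1) 1).foldl (FpF tab (tab.length : Int))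
          (bL, bI, bG) := by
  intro k
  induction k with
  | zero =>
    intro i bL bI bG hk h0
    rw [PySem.List.pyRange_one_eq_nil (by omega), bOuter_step,
      if_neg (by omega : ¬ i < (tab.length : Int) - 1)]
    rfl
  | succ k ih =>
    intro i bL bI bG hk h0
    have hi : i < (tab.length : Int) - 1 := by omega
    obtain ⟨hge, hle, _, _, _⟩ := dI_char tab hpos i h0 (by omega)
    rw [PySem.List.pyRange_one_cons hi, List.foldl_cons, bOuter_step, if_pos hi]
    rw [show (bInner tab (tab.length : Int) (PySem.List.pyGetD tab i 0) i).1 = dI tab i from rfl,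
      show (bInner tab (tab.length : Int) (PySem.List.pyGetD tab i 0) i).2 = gI tab i from rfl]
    by_cases hend : dI tab i = (tab.length : Int)
    · rw [if_pos hend]
      symm
      have hF : FpF tab (tab.length : Int) (bL, bI, bG) i = (bL, bI, bG) := by
        unfold FpF; rw [if_neg (by rintro ⟨h, _⟩; omega)]
      rw [hF]
      apply foldl_id_of
      intro b' s hs
      obtain ⟨hs1, hs2⟩ := PySem.List.mem_pyRange_one.mp hs
      have := dI_mono tab hpos i s h0 (by omega) (by omega)
      unfold FpF
      rw [if_neg (by rintro ⟨h, _⟩; omega)]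
    · rw [if_neg hend]
      by_cases hrec : dI tab i - i > bL
      · rw [if_pos hrec]
        have hF : FpF tab (tab.length : Int) (bL, bI, bG) i
            = (dI tab i - i, i, gI tab i) := by
          unfold FpF; rw [if_pos ⟨by omega, hrec⟩]
        rw [hF]
        exact ih (i + 1) _ _ _ (by omega) (by omega)
      · rw [if_neg hrec]
        have hF : FpF tab (tab.length : Int) (bL, bI, bG) i = (bL, bI, bG) := by
          unfold FpF; rw [if_neg (by rintro ⟨_, h⟩; exact hrec h)]
        rw [hF]
        exact ih (i + 1) _ _ _ (by omega) (by omega)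

-- the start n - 1 contributes nothing: its run either survives to the end or has length 0
lemma pv_ext (tab : List Int) (hpos : ∀ x ∈ tab, 0 < x) (hn : 1 ≤ (tab.length : Int)) :
    (PySem.List.pyRange 0 ((tab.length : Int) - 1) 1).foldl (FpF tab (tab.length : Int)) (0, 0, 0)
      = (PySem.List.pyRange 0 (tab.length : Int) 1).foldl (FpF tab (tab.length : Int)) (0, 0, 0) := by
  rw [PySem.List.pyRange_one_append 0 ((tab.length : Int) - 1) (tab.length : Int) (by omega)
    (by omega), List.foldl_append]
  have hlast : PySem.List.pyRange ((tab.length : Int) - 1) (tab.length : Int) 1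
      = [(tab.length : Int) - 1] := by
    rw [PySem.List.pyRange_one_cons (by omega), PySem.List.pyRange_one_eq_nil (by omega)]
  rw [hlast]
  symm
  simp only [List.foldl_cons, List.foldl_nil]
  set L := (PySem.List.pyRange 0 ((tab.length : Int) - 1) 1).foldl
    (FpF tab (tab.length : Int)) ((0 : Int), (0 : Int), (0 : Int)) with hL
  have hNN : 0 ≤ L.1 := by
    apply pv_NN tab hpos
    · intro s hs
      obtain ⟨hs1, hs2⟩ := PySem.List.mem_pyRange_one.mp hs
      exact ⟨hs1, by omega⟩
    · norm_num
  obtain ⟨hge, hle, _, _, _⟩ := dI_char tab hpos ((tab.length : Int) - 1) (by omega) (by omega)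
  unfold FpF
  rw [if_neg (by rintro ⟨h1, h2⟩; omega)]

-- ===== VERDICT (by name: the statement is the Claim_ definition above) =====
theorem podciagLiczbZeWspolnymDzielnikiem_spec : Claim_equal_podciagLiczbZeWspolnymDzielnikiem := by
  unfold Claim_equal_podciagLiczbZeWspolnymDzielnikiem
  intro tab _ hpre
  unfold Spec_podciagLiczbZeWspolnymDzielnikiem
  simp only [podciagLiczbZeWspolnymDzielnikiem, podciagLiczbZeWspolnymDzielnikiem_alt]
  rcases hpre with hlen | ⟨hne, hpos⟩
  · -- a one-element list: A's loop is empty, B's sweep records nothing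
    rw [hlen]
    have h01 : PySem.List.pyRange 0 ((1 : Nat) : Int) 1 = [0] := by decide
    have h00 : PySem.List.pyRange 0 (((1 : Nat) : Int) - 1) 1 = [] := by decide
    rw [h01, h00]
    simp only [List.foldl_cons, List.foldl_nil]
    show _ = (PySem.List.pyGetD tab (bStepB tab ((0,0,0), []) 0).1.2.1 0,
      (bStepB tab ((0,0,0), []) 0).1.1, (bStepB tab ((0,0,0), []) 0).1.2.2)
    unfold bStepB
    simp only [List.nil_append, List.foldl_cons, List.foldl_nil]
    unfold bInnerStepB
    by_cases h : pyGcd (PySem.List.pyGetD tab 0 0) (PySem.List.pyGetD tab 0 0) = 1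
    · simp [h]
    · simp [h]
  · have hn : 1 ≤ (tab.length : Int) := by
      have : tab.length ≠ 0 := by simpa [List.length_eq_zero_iff] using hne
      omega
    rw [pv_outer tab hpos (((tab.length : Int) - 1 - 0).toNat) 0 0 0 0 rfl (by omega)]
    rw [pv_L1 tab hpos (((tab.length : Int) - 1 - 0).toNat) 0 0 0 0 rfl (by omega)]
    rw [pv_ext tab hpos hn]
    rw [pv_sweep tab hpos (tab.length : Int).toNat (tab.length : Int) rfl (by omega) (le_refl _)]
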